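-- pv_equiv track=rewrite | github.com/yeseong31/coding-test | 프로그래머스/prev/Level1&2/모의고사.py | solution
-- ===== SOURCE A (Python) =====
-- def solution(answers):
--     p1 = [1, 2, 3, 4, 5, ]
--     p2 = [2, 1, 2, 3, 2, 4, 2, 5, ]
--     p3 = [3, 3, 1, 1, 2, 2, 4, 4, 5, 5, ]
--
--     cnt = [0, 0, 0]
--     for i in range(len(answers)):
--         if p1[(i % 5)] == answers[i]:
--             cnt[0] += 1
--         if p2[(i % 8)] == answers[i]:
--             cnt[1] += 1
--         if p3[(i % 10)] == answers[i]:
--             cnt[2] += 1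
--
--     result = []
--     max_cnt = max(cnt)
--     for i in range(3):
--         if cnt[i] == max_cnt:
--             result.append(i + 1)
--
--     return result
-- ===== SOURCE B (Python) =====
-- def solution(answers):
--     # Aggregate answers by (position mod 40, value): 40 = lcm of the three
--     # pattern periods, so each supervisor's score is a fixed 40-term table sum.
--     freq = {}
--     for i, a in enumerate(answers):
--         key = (i % 40, a)
--         freq[key] = freq.get(key, 0) + 1
--     patterns = [[1, 2, 3, 4, 5],
--                 [2, 1, 2, 3, 2, 4, 2, 5],
--                 [3, 3, 1, 1, 2, 2, 4, 4, 5, 5]]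
--     counts = [sum(freq.get((r, p[r % len(p)]), 0) for r in range(40))
--               for p in patterns]
--     m = max(counts)
--     return [i + 1 for i, c in enumerate(counts) if c == m]
-- ===== Notes on version B (the rewrite author's own statement) =====
-- stated objective: alternative
-- what changed: A compares every answer against all three patterns in one pass with three counters; B instead aggregates answers into a dict keyed by (index mod 40, value) (40 = lcm of the pattern periods) and then computes each supervisor's score as a fixed 40-term sum of dict lookups.
import Mathlib
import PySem

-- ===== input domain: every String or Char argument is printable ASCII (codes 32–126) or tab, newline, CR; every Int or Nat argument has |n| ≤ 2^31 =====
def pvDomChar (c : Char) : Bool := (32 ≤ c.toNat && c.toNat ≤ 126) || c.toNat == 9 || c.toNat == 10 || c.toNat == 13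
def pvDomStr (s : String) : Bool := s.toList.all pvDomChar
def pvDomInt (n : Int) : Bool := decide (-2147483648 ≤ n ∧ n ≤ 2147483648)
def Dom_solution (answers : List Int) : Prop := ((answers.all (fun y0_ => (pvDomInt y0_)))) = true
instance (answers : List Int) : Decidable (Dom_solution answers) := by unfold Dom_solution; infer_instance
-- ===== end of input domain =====

-- B replaces A's single pass with three parallel pattern comparisons by a hash
-- aggregation over (index mod 40, answer) — 40 = lcm of the pattern periods —
-- after which each supervisor's score is a fixed 40-term table sum; objective: alternative.


-- ===== PORT A =====
-- 'for i in range(len(answers)): … answers[i] …' is ported as a fold over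
-- PySem.List.enumerate answers, whose pairs are exactly (i, answers[i]); indexing
-- p1[i % 5] etc. uses PySem.Int.mod and pyGetD (the index is always in range).
def solution (answers : List Int) : List Int :=
  let p1 : List Int := [1, 2, 3, 4, 5]
  let p2 : List Int := [2, 1, 2, 3, 2, 4, 2, 5]
  let p3 : List Int := [3, 3, 1, 1, 2, 2, 4, 4, 5, 5]
  let cnt : Int × Int × Int :=
    (PySem.List.enumerate answers).foldl (fun c ia =>
      (if PySem.List.pyGetD p1 (PySem.Int.mod ia.1 5) 0 == ia.2 then c.1 + 1 else c.1,
       if PySem.List.pyGetD p2 (PySem.Int.mod ia.1 8) 0 == ia.2 then c.2.1 + 1 else c.2.1,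
       if PySem.List.pyGetD p3 (PySem.Int.mod ia.1 10) 0 == ia.2 then c.2.2 + 1 else c.2.2))
      (0, 0, 0)
  let cntL : List Int := [cnt.1, cnt.2.1, cnt.2.2]
  let maxCnt : Int := (PySem.List.max? cntL (fun x => x)).getD 0
  (PySem.List.pyRange 0 3 1).foldl (fun res i =>
    if PySem.List.pyGetD cntL i 0 == maxCnt then res ++ [i + 1] else res) []

-- ===== PORT B =====
-- freq[key] = freq.get(key, 0) + 1 over keys (i % 40, a); then each count is a
-- 40-term sum of freq lookups, one per cycle position.
def solution_alt (answers : List Int) : List Int :=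
  let freq : PySem.Dict (Int × Int) Int :=
    (PySem.List.enumerate answers).foldl (fun d ia =>
      d.insert (PySem.Int.mod ia.1 40, ia.2)
        (d.getD (PySem.Int.mod ia.1 40, ia.2) 0 + 1)) PySem.Dict.empty
  let patterns : List (List Int) :=
    [[1, 2, 3, 4, 5], [2, 1, 2, 3, 2, 4, 2, 5], [3, 3, 1, 1, 2, 2, 4, 4, 5, 5]]
  let counts : List Int := patterns.map (fun p =>
    (PySem.List.pyRange 0 40 1).foldl (fun s r =>
      s + freq.getD (r, PySem.List.pyGetD p (PySem.Int.mod r (p.length : Int)) 0) 0) 0)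
  let m : Int := (PySem.List.max? counts (fun x => x)).getD 0
  ((PySem.List.enumerate counts).filter (fun ic => ic.2 == m)).map (fun ic => ic.1 + 1)

-- ===== PRECONDITION & SPEC =====
def Spec_solution (answers : List Int) (out : List Int) : Prop := out = solution_alt answers
instance (answers : List Int) (out : List Int) : Decidable (Spec_solution answers out) := by unfold Spec_solution; infer_instance

-- ===== CLAIM (what is proved, stated in full; the proofs are below) =====
def Claim_equal_solution : Prop := ∀ (answers : List Int), Dom_solution answers → Spec_solution answers (solution answers)

-- ===== LEMMAS AND PROOFS =====

-- direct match count for one pattern (proof-only abbreviation of A's per-pattern accumulator)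
def countA (p : List Int) (answers : List Int) : Int :=
  (PySem.List.enumerate answers).foldl (fun s ia =>
    if PySem.List.pyGetD p (PySem.Int.mod ia.1 (p.length : Int)) 0 == ia.2 then s + 1 else s) 0

-- A's combined triple fold splits into the three per-pattern counts
theorem loopA_eq (answers : List Int) :
    (PySem.List.enumerate answers).foldl (fun (c : Int × Int × Int) ia =>
      (if PySem.List.pyGetD [1, 2, 3, 4, 5] (PySem.Int.mod ia.1 5) 0 == ia.2 then c.1 + 1 else c.1,
       if PySem.List.pyGetD [2, 1, 2, 3, 2, 4, 2, 5] (PySem.Int.mod ia.1 8) 0 == ia.2 then c.2.1 + 1 else c.2.1,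
       if PySem.List.pyGetD [3, 3, 1, 1, 2, 2, 4, 4, 5, 5] (PySem.Int.mod ia.1 10) 0 == ia.2 then c.2.2 + 1 else c.2.2))
      (0, 0, 0)
    = (countA [1, 2, 3, 4, 5] answers,
       countA [2, 1, 2, 3, 2, 4, 2, 5] answers,
       countA [3, 3, 1, 1, 2, 2, 4, 4, 5, 5] answers) := by
  refine Eq.trans
    (PySem.List.foldl_prod_mk
      (fun (s : Int) (ia : Int × Int) =>
        if PySem.List.pyGetD [1, 2, 3, 4, 5] (PySem.Int.mod ia.1 5) 0 == ia.2 then s + 1 else s)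
      (fun (s : Int × Int) (ia : Int × Int) =>
        (if PySem.List.pyGetD [2, 1, 2, 3, 2, 4, 2, 5] (PySem.Int.mod ia.1 8) 0 == ia.2 then s.1 + 1 else s.1,
         if PySem.List.pyGetD [3, 3, 1, 1, 2, 2, 4, 4, 5, 5] (PySem.Int.mod ia.1 10) 0 == ia.2 then s.2 + 1 else s.2))
      (PySem.List.enumerate answers) 0 (0, 0)) ?_
  exact Prod.ext rfl
    ((PySem.List.foldl_prod_mk
      (fun (s : Int) (ia : Int × Int) =>
        if PySem.List.pyGetD [2, 1, 2, 3, 2, 4, 2, 5] (PySem.Int.mod ia.1 8) 0 == ia.2 then s + 1 else s)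
      (fun (s : Int) (ia : Int × Int) =>
        if PySem.List.pyGetD [3, 3, 1, 1, 2, 2, 4, 4, 5, 5] (PySem.Int.mod ia.1 10) 0 == ia.2 then s + 1 else s)
      (PySem.List.enumerate answers) 0 0).trans rfl)

-- a 0/1 indicator sum over a duplicate-free list picks out the single member
theorem sum_ite_mem (l : List Int) (hl : l.Nodup) (j : Int) (h : Int → Int) :
    (l.map (fun r => if r = j then h r else 0)).sum = if j ∈ l then h j else 0 := by
  induction l with
  | nil => simp
  | cons r t ih =>
    simp only [List.nodup_cons] at hl
    simp only [List.map_cons, List.sum_cons, ih hl.2, List.mem_cons]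
    by_cases hr : r = j
    · subst hr
      simp [hl.1]
    · simp [hr, Ne.symm hr]

-- one aggregated element: the 40 table cells see a given pair (j, a) exactly once
theorem sum_ite_pair (g : Int → Int) (j a : Int) (hj0 : 0 ≤ j) (hj : j < 40) :
    ((PySem.List.pyRange 0 40 1).map
      (fun r => if ((j, a) : Int × Int) = (r, g r) then (1 : Int) else 0)).sum
    = if g j == a then 1 else 0 := by
  have hpt : (fun r => if ((j, a) : Int × Int) = (r, g r) then (1 : Int) else 0)
      = (fun r => if r = j then (if g r == a then (1 : Int) else 0) else 0) := by
    funext r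
    by_cases hr : r = j
    · subst hr
      by_cases hg : g r = a
      · simp [hg]
      · simp [Prod.ext_iff, hg, (Ne.symm hg : a ≠ g r)]
    · simp only [Prod.ext_iff]
      rw [if_neg (fun h => hr h.1.symm), if_neg (fun h => hr h)]
  rw [hpt, sum_ite_mem _ (by decide) j]
  have hmem : j ∈ PySem.List.pyRange 0 40 1 := by
    rw [PySem.List.mem_pyRange_one]; exact ⟨hj0, hj⟩
  simp [hmem]

-- the 40-cell table sum over the (i % 40, aᵢ) multiset equals the direct match count
theorem table_sum_int (g : Int → Int) (L : List (Int × Int)) :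
    ((PySem.List.pyRange 0 40 1).map (fun r =>
      (((L.map (fun ia => (PySem.Int.mod ia.1 40, ia.2))).count (r, g r) : Nat) : Int))).sum
    = ((L.countP (fun ia => g (PySem.Int.mod ia.1 40) == ia.2) : Nat) : Int) := by
  induction L with
  | nil => simp
  | cons x t ih =>
    have hx0 : 0 ≤ PySem.Int.mod x.1 40 := by
      rw [PySem.Int.mod_eq_emod_of_pos (by norm_num)]
      exact Int.emod_nonneg _ (by norm_num)
    have hx40 : PySem.Int.mod x.1 40 < 40 := by
      rw [PySem.Int.mod_eq_emod_of_pos (by norm_num)]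
      exact Int.emod_lt_of_pos _ (by norm_num)
    simp only [List.map_cons, List.count_cons, List.countP_cons, Nat.cast_add, apply_ite,
      Nat.cast_one, Nat.cast_zero, beq_iff_eq]
    have hsplit : (fun r =>
        if ((PySem.Int.mod x.1 40, x.2) : Int × Int) = (r, g r) then
          ((((t.map (fun ia => (PySem.Int.mod ia.1 40, ia.2))).count (r, g r) : Nat) : Int) + 1)
        else ((((t.map (fun ia => (PySem.Int.mod ia.1 40, ia.2))).count (r, g r) : Nat) : Int) + 0))
        = (fun r =>
          (((t.map (fun ia => (PySem.Int.mod ia.1 40, ia.2))).count (r, g r) : Nat) : Int)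
          + if ((PySem.Int.mod x.1 40, x.2) : Int × Int) = (r, g r) then (1 : Int) else 0) := by
      funext r
      split_ifs <;> rfl
    rw [hsplit, List.sum_map_add, ih, sum_ite_pair g _ _ hx0 hx40]
    by_cases hg : g (PySem.Int.mod x.1 40) = x.2 <;> simp_all

-- one pattern's table sum (B) equals A's direct per-pattern count
theorem count_table (p : List Int) (hp : (p.length : Int) ∣ 40) (hl : 0 < (p.length : Int))
    (answers : List Int) :
    (PySem.List.pyRange 0 40 1).foldl (fun s r =>
        s + (PySem.Dict.counter ((PySem.List.enumerate answers).map
              (fun ia => (PySem.Int.mod ia.1 40, ia.2)))).getD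
            (r, PySem.List.pyGetD p (PySem.Int.mod r (p.length : Int)) 0) 0) 0
    = countA p answers := by
  rw [PySem.List.foldl_add, zero_add]
  simp only [PySem.Dict.getD_counter]
  rw [table_sum_int (fun r => PySem.List.pyGetD p (PySem.Int.mod r (p.length : Int)) 0)]
  have hA : countA p answers
      = (((PySem.List.enumerate answers).countP
          (fun ia => PySem.List.pyGetD p (PySem.Int.mod ia.1 (p.length : Int)) 0 == ia.2) : Nat) : Int) := by
    unfold countA
    rw [PySem.List.foldl_count_if, zero_add]
  rw [hA]
  congr 1
  apply List.countP_congr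
  intro ia _
  have hmm : PySem.Int.mod (PySem.Int.mod ia.1 40) (p.length : Int)
      = PySem.Int.mod ia.1 (p.length : Int) := by
    rw [PySem.Int.mod_eq_emod_of_pos (by norm_num : (0:Int) < 40),
        PySem.Int.mod_eq_emod_of_pos hl, PySem.Int.mod_eq_emod_of_pos hl,
        Int.emod_emod_of_dvd _ hp]
  rw [hmm]

-- result-stage agreement on any three counts
theorem final_eq (x y z : Int) :
    (PySem.List.pyRange 0 3 1).foldl (fun res i =>
      if PySem.List.pyGetD [x, y, z] i 0 == ((PySem.List.max? [x, y, z] (fun v => v)).getD 0) then res ++ [i + 1] else res) []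
    = ((PySem.List.enumerate [x, y, z]).filter
        (fun ic => ic.2 == ((PySem.List.max? [x, y, z] (fun v => v)).getD 0))).map (fun ic => ic.1 + 1) := by
  rw [show PySem.List.pyRange 0 3 1 = [0, 1, 2] from by decide]
  generalize ((PySem.List.max? [x, y, z] (fun v => v)).getD 0) = m
  simp only [List.foldl, PySem.List.enumerate_cons, PySem.List.enumerate_nil,
    List.filter_cons, List.filter_nil, PySem.List.pyGetD_ofNat']
  norm_num
  split_ifs <;> simp_all

-- ===== VERDICT (by name: the statement is the Claim_ definition above) =====
theorem solution_spec : Claim_equal_solution := by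
  intro answers _
  unfold Spec_solution solution solution_alt
  simp only []
  rw [loopA_eq]
  have hfreq : (PySem.List.enumerate answers).foldl (fun d ia =>
      d.insert (PySem.Int.mod ia.1 40, ia.2)
        (d.getD (PySem.Int.mod ia.1 40, ia.2) 0 + 1)) PySem.Dict.empty
      = PySem.Dict.counter ((PySem.List.enumerate answers).map
          (fun ia => (PySem.Int.mod ia.1 40, ia.2))) := by
    rw [← PySem.Dict.foldl_insert_getD_add_one_eq_counter, List.foldl_map]
  rw [hfreq]
  simp only [List.map_cons, List.map_nil]
  rw [count_table [1,2,3,4,5] (by decide) (by decide) answers,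
      count_table [2,1,2,3,2,4,2,5] (by decide) (by decide) answers,
      count_table [3,3,1,1,2,2,4,4,5,5] (by decide) (by decide) answers]
  exact final_eq _ _ _
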